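-- pv_equiv track=rewrite | github.com/wudu98/autoGEMM | experiment/pipeline_optimization/make_c_file_instrinsic.py | compile_time_for_store
-- ===== SOURCE A (Python) =====
-- def compile_time_for_store(M, N, K, lda, ldb, ldc, COLS, LINES):
--     MASK = N % 4
--     code_str = ""
--     for i in range(LINES*COLS):
--         line = i // COLS
--         col = i % COLS
--         if (col == COLS-1):
--           if MASK == 0:
--             code_str += f"    vst1q_f32(C + m * {ldc} + {line * ldc + col * 4}, vc[{i}]);\n"
--           if MASK == 1:
--             code_str += f"    vst1q_lane_f32(C + m * {ldc} + {line * ldc + col * 4}, vc[{i}], 0);\n"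
--           if MASK == 2:
--             code_str += f"    vst1q_lane_f32(C + m * {ldc} + {line * ldc + col * 4}, vc[{i}], 0);\n"
--             code_str += f"    vst1q_lane_f32(C + m * {ldc} + {line * ldc + col * 4 + 1}, vc[{i}], 1);\n"
--           if MASK == 3:
--             code_str += f"    vst1q_lane_f32(C + m * {ldc} + {line * ldc + col * 4}, vc[{i}], 0);\n"
--             code_str += f"    vst1q_lane_f32(C + m * {ldc} + {line * ldc + col * 4 + 1}, vc[{i}], 1);\n"
--             code_str += f"    vst1q_lane_f32(C + m * {ldc} + {line * ldc + col * 4 + 2}, vc[{i}], 2);\n"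
--         else:
--           code_str += f"    vst1q_f32(C + m * {ldc} + {line * ldc + col * 4}, vc[{i}]);\n"
--     return code_str
-- ===== SOURCE B (Python) =====
-- def compile_time_for_store(M, N, K, lda, ldb, ldc, COLS, LINES):
--     MASK = N % 4
--     if COLS <= 0 or LINES <= 0:
--         return ""
--     # Stage 1: plan the stores of one row as (col, lane) pairs; lane None = full store.
--     plan = [(col, None) for col in range(COLS - 1)]
--     if MASK == 0:
--         plan.append((COLS - 1, None))
--     else:
--         plan.extend((COLS - 1, lane) for lane in range(MASK))
--     # Stage 2: render the same plan once per row.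
--     def render(line, col, lane):
--         i = line * COLS + col
--         off = line * ldc + col * 4
--         if lane is None:
--             return f"    vst1q_f32(C + m * {ldc} + {off}, vc[{i}]);\n"
--         return f"    vst1q_lane_f32(C + m * {ldc} + {off + lane}, vc[{i}], {lane});\n"
--     return "".join(render(line, col, lane) for line in range(LINES) for (col, lane) in plan)
-- ===== Notes on version B (the rewrite author's own statement) =====
-- stated objective: alternative
-- what changed: Two staged passes instead of A's single flat-index loop with div/mod and four unrolled MASK if-blocks: B first builds a per-row store plan (a list of (col, lane) descriptors, computed once, with all MASK branching folded into it), then renders that same plan once per row, so the per-cell last-column/MASK tests disappear from the emission loop.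
-- intended difference: When COLS and LINES are both negative, range(LINES*COLS) is nonempty so A emits spurious store lines recovered from meaningless div/mod indices (e.g. one full store for COLS=LINES=-1), while B returns "", the intended output for a degenerate tile shape. — e.g. on compile_time_for_store(0, 0, 0, 0, 0, 0, -1, -1): A returns " vst1q_f32(C + m * 0 + 0, vc[0]);\n", B returns ""
import Mathlib
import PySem

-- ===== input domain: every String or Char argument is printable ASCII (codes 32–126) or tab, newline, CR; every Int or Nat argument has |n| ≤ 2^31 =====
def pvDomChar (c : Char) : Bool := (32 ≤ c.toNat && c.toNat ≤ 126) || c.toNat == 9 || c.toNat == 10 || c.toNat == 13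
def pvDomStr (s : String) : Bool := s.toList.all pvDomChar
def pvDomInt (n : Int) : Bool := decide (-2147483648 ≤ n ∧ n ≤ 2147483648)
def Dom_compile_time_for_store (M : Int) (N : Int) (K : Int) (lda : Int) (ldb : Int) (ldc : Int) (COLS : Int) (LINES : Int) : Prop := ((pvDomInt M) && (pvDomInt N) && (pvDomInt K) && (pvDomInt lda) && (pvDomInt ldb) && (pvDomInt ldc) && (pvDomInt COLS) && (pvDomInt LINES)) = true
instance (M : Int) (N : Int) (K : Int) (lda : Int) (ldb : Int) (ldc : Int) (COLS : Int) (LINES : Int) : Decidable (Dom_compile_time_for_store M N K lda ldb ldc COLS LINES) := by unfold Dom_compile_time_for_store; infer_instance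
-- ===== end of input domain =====

-- B: staged passes — build one per-row store plan (all MASK branching folded into it), then render
-- that plan once per row; A loops a flat index with div/mod and four unrolled MASK blocks. On
-- COLS<0 ∧ LINES<0 A emits spurious lines, B returns "".

-- ===== PORT A =====
-- shared f-string templates of the generated C lines
def pvFull (ldc i off : Int) : String :=
  "    vst1q_f32(C + m * " ++ PySem.Int.toStr ldc ++ " + " ++ PySem.Int.toStr off ++ ", vc[" ++ PySem.Int.toStr i ++ "]);\n"
def pvLane (ldc i off lane : Int) : String :=
  "    vst1q_lane_f32(C + m * " ++ PySem.Int.toStr ldc ++ " + " ++ PySem.Int.toStr off ++ ", vc[" ++ PySem.Int.toStr i ++ "], " ++ PySem.Int.toStr lane ++ ");\n"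

def compile_time_for_store (M : Int) (N : Int) (K : Int) (lda : Int) (ldb : Int) (ldc : Int) (COLS : Int) (LINES : Int) : String :=
  let MASK := PySem.Int.mod N 4
  (PySem.List.pyRange 0 (LINES * COLS) 1).foldl (fun code_str i =>
    let line := PySem.Int.floordiv i COLS
    let col := PySem.Int.mod i COLS
    if col = COLS - 1 then
      let code_str := if MASK = 0 then code_str ++ pvFull ldc i (line * ldc + col * 4) else code_str
      let code_str := if MASK = 1 then code_str ++ pvLane ldc i (line * ldc + col * 4) 0 else code_str
      let code_str := if MASK = 2 then
          code_str ++ pvLane ldc i (line * ldc + col * 4) 0 ++ pvLane ldc i (line * ldc + col * 4 + 1) 1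
        else code_str
      let code_str := if MASK = 3 then
          code_str ++ pvLane ldc i (line * ldc + col * 4) 0 ++ pvLane ldc i (line * ldc + col * 4 + 1) 1
            ++ pvLane ldc i (line * ldc + col * 4 + 2) 2
        else code_str
      code_str
    else
      code_str ++ pvFull ldc i (line * ldc + col * 4)) ""

-- ===== PORT B =====
-- render(line, col, lane) of Source B
def pvRender (COLS ldc : Int) (line col : Int) (lane : Option Int) : String :=
  let i := line * COLS + col
  let off := line * ldc + col * 4
  match lane with
  | none => pvFull ldc i off
  | some lane => pvLane ldc i (off + lane) lane

def compile_time_for_store_alt (M : Int) (N : Int) (K : Int) (lda : Int) (ldb : Int) (ldc : Int) (COLS : Int) (LINES : Int) : String :=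
  let MASK := PySem.Int.mod N 4
  if COLS ≤ 0 ∨ LINES ≤ 0 then "" else
  -- Stage 1: the per-row plan
  let plan : List (Int × Option Int) :=
    ((PySem.List.pyRange 0 (COLS - 1) 1).map (fun col => (col, (none : Option Int))))
      ++ (if MASK = 0 then [(COLS - 1, (none : Option Int))]
          else (PySem.List.pyRange 0 MASK 1).map (fun lane => (COLS - 1, some lane)))
  -- Stage 2: render the same plan once per row, join once
  String.join ((PySem.List.pyRange 0 LINES 1).flatMap (fun line =>
    plan.map (fun p => pvRender COLS ldc line p.1 p.2)))

-- ===== PRECONDITION & SPEC =====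
-- When COLS and LINES are both negative, range(LINES*COLS) is nonempty so A emits spurious store
-- lines from meaningless div/mod indices, while B returns "", the intended output for a
-- degenerate tile shape.
def D_compile_time_for_store (M : Int) (N : Int) (K : Int) (lda : Int) (ldb : Int) (ldc : Int) (COLS : Int) (LINES : Int) : Prop :=
  COLS < 0 ∧ LINES < 0
instance (M : Int) (N : Int) (K : Int) (lda : Int) (ldb : Int) (ldc : Int) (COLS : Int) (LINES : Int) : Decidable (D_compile_time_for_store M N K lda ldb ldc COLS LINES) := by unfold D_compile_time_for_store; infer_instance

def Spec_compile_time_for_store (M : Int) (N : Int) (K : Int) (lda : Int) (ldb : Int) (ldc : Int) (COLS : Int) (LINES : Int) (out : String) : Prop := ¬ D_compile_time_for_store M N K lda ldb ldc COLS LINES → out = compile_time_for_store_alt M N K lda ldb ldc COLS LINES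
instance (M : Int) (N : Int) (K : Int) (lda : Int) (ldb : Int) (ldc : Int) (COLS : Int) (LINES : Int) (out : String) : Decidable (Spec_compile_time_for_store M N K lda ldb ldc COLS LINES out) := by unfold Spec_compile_time_for_store; infer_instance

def pvDiffWitness_compile_time_for_store : Int × Int × Int × Int × Int × Int × Int × Int := (0, 0, 0, 0, 0, 0, -1, -1)
def pvDiffWitnessOut_compile_time_for_store : String × String := ("    vst1q_f32(C + m * 0 + 0, vc[0]);\n", "")

-- ===== CLAIM (what is proved, stated in full; the proofs are below) =====
def Claim_unchanged_compile_time_for_store : Prop := ∀ (M : Int) (N : Int) (K : Int) (lda : Int) (ldb : Int) (ldc : Int) (COLS : Int) (LINES : Int), Dom_compile_time_for_store M N K lda ldb ldc COLS LINES → Spec_compile_time_for_store M N K lda ldb ldc COLS LINES (compile_time_for_store M N K lda ldb ldc COLS LINES)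
def Claim_changed_compile_time_for_store : Prop := Dom_compile_time_for_store (pvDiffWitness_compile_time_for_store.1) (pvDiffWitness_compile_time_for_store.2.1) (pvDiffWitness_compile_time_for_store.2.2.1) (pvDiffWitness_compile_time_for_store.2.2.2.1) (pvDiffWitness_compile_time_for_store.2.2.2.2.1) (pvDiffWitness_compile_time_for_store.2.2.2.2.2.1) (pvDiffWitness_compile_time_for_store.2.2.2.2.2.2.1) (pvDiffWitness_compile_time_for_store.2.2.2.2.2.2.2) ∧ D_compile_time_for_store (pvDiffWitness_compile_time_for_store.1) (pvDiffWitness_compile_time_for_store.2.1) (pvDiffWitness_compile_time_for_store.2.2.1) (pvDiffWitness_compile_time_for_store.2.2.2.1) (pvDiffWitness_compile_time_for_store.2.2.2.2.1) (pvDiffWitness_compile_time_for_store.2.2.2.2.2.1) (pvDiffWitness_compile_time_for_store.2.2.2.2.2.2.1) (pvDiffWitness_compile_time_for_store.2.2.2.2.2.2.2) ∧ compile_time_for_store (pvDiffWitness_compile_time_for_store.1) (pvDiffWitness_compile_time_for_store.2.1) (pvDiffWitness_compile_time_for_store.2.2.1) (pvDiffWitness_compile_time_for_store.2.2.2.1)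 (pvDiffWitness_compile_time_for_store.2.2.2.2.1) (pvDiffWitness_compile_time_for_store.2.2.2.2.2.1) (pvDiffWitness_compile_time_for_store.2.2.2.2.2.2.1) (pvDiffWitness_compile_time_for_store.2.2.2.2.2.2.2) = pvDiffWitnessOut_compile_time_for_store.1 ∧ compile_time_for_store_alt (pvDiffWitness_compile_time_for_store.1) (pvDiffWitness_compile_time_for_store.2.1) (pvDiffWitness_compile_time_for_store.2.2.1) (pvDiffWitness_compile_time_for_store.2.2.2.1) (pvDiffWitness_compile_time_for_store.2.2.2.2.1) (pvDiffWitness_compile_time_for_store.2.2.2.2.2.1) (pvDiffWitness_compile_time_for_store.2.2.2.2.2.2.1) (pvDiffWitness_compile_time_for_store.2.2.2.2.2.2.2) = pvDiffWitnessOut_compile_time_for_store.2 ∧ pvDiffWitnessOut_compile_time_for_store.1 ≠ pvDiffWitnessOut_compile_time_for_store.2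
def Claim_exact_compile_time_for_store : Prop := ∀ (M : Int) (N : Int) (K : Int) (lda : Int) (ldb : Int) (ldc : Int) (COLS : Int) (LINES : Int), Dom_compile_time_for_store M N K lda ldb ldc COLS LINES → D_compile_time_for_store M N K lda ldb ldc COLS LINES → compile_time_for_store M N K lda ldb ldc COLS LINES ≠ compile_time_for_store_alt M N K lda ldb ldc COLS LINES

-- ===== LEMMAS AND PROOFS =====

-- A's loop body as a per-index string
def pvGA (N ldc COLS : Int) (i : Int) : String :=
  let MASK := PySem.Int.mod N 4
  let line := PySem.Int.floordiv i COLS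
  let col := PySem.Int.mod i COLS
  if col = COLS - 1 then
    (if MASK = 0 then pvFull ldc i (line * ldc + col * 4) else "")
      ++ (if MASK = 1 then pvLane ldc i (line * ldc + col * 4) 0 else "")
      ++ (if MASK = 2 then pvLane ldc i (line * ldc + col * 4) 0 ++ pvLane ldc i (line * ldc + col * 4 + 1) 1 else "")
      ++ (if MASK = 3 then pvLane ldc i (line * ldc + col * 4) 0 ++ pvLane ldc i (line * ldc + col * 4 + 1) 1 ++ pvLane ldc i (line * ldc + col * 4 + 2) 2 else "")
  else pvFull ldc i (line * ldc + col * 4)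

-- the strings emitted for one (line, col) cell, as a list
def pvChunk (N ldc COLS : Int) (line col : Int) : List String :=
  let MASK := PySem.Int.mod N 4
  let i := line * COLS + col
  let base := line * ldc + col * 4
  if col ≠ COLS - 1 ∨ MASK = 0 then [pvFull ldc i base]
  else (PySem.List.pyRange 0 MASK 1).map (fun lane => pvLane ldc i (base + lane) lane)

theorem pvFoldl_append_str (l : List String) (s : String) :
    List.foldl (fun r t => r ++ t) s l = s ++ List.foldl (fun r t => r ++ t) "" l := by
  induction l generalizing s with
  | nil => simp
  | cons x xs ih =>
      simp only [List.foldl_cons]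
      rw [ih (s ++ x), ih ("" ++ x)]
      simp [String.append_assoc]

theorem pvJoin_cons (s : String) (l : List String) : String.join (s :: l) = s ++ String.join l := by
  simp only [String.join, List.foldl_cons, String.empty_append]
  exact pvFoldl_append_str l s

theorem pvJoin_append (a b : List String) : String.join (a ++ b) = String.join a ++ String.join b := by
  induction a with
  | nil => simp [String.join]
  | cons x xs ih => simp only [List.cons_append, pvJoin_cons, ih, String.append_assoc]

theorem pvJoin_flatMap {α : Type} (h : α → List String) (xs : List α) :
    String.join (xs.flatMap h) = String.join (xs.map (fun x => String.join (h x))) := by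
  induction xs with
  | nil => rfl
  | cons x t ih => simp only [List.flatMap_cons, List.map_cons, pvJoin_append, pvJoin_cons, ih]

theorem pvFoldl_hom (body : String → Int → String) (g : Int → String)
    (hb : ∀ a i, body a i = a ++ g i) :
    ∀ (xs : List Int) (acc : String), List.foldl body acc xs = acc ++ String.join (xs.map g) := by
  intro xs
  induction xs with
  | nil => intro acc; simp [String.join]
  | cons x t ih =>
      intro acc
      simp only [List.foldl_cons, List.map_cons, pvJoin_cons, hb, ih, String.append_assoc]

theorem pvA_eq (M N K lda ldb ldc COLS LINES : Int) :
    compile_time_for_store M N K lda ldb ldc COLS LINES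
      = String.join ((PySem.List.pyRange 0 (LINES * COLS) 1).map (pvGA N ldc COLS)) := by
  show List.foldl _ "" _ = _
  rw [pvFoldl_hom _ (pvGA N ldc COLS) ?hb, String.empty_append]
  case hb =>
    intro a i
    simp only [pvGA]
    split_ifs <;> simp_all [String.append_assoc]

theorem pvFlatMap_nil' {α : Type} (xs : List α) : xs.flatMap (fun _ => ([] : List String)) = [] := by
  induction xs with
  | nil => rfl
  | cons x t ih => simp [ih]

theorem pvFlatMap_singleton {α : Type} (h : α → List String) (g : α → String) (xs : List α)
    (hx : ∀ x ∈ xs, h x = [g x]) : xs.flatMap h = xs.map g := by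
  induction xs with
  | nil => rfl
  | cons x t ih =>
      simp only [List.flatMap_cons, List.map_cons, hx x (by simp)]
      rw [ih (fun y hy => hx y (by simp [hy]))]
      rfl

theorem pvB_eq (M N K lda ldb ldc COLS LINES : Int) :
    compile_time_for_store_alt M N K lda ldb ldc COLS LINES
      = String.join ((PySem.List.pyRange 0 LINES 1).flatMap (fun line =>
          (PySem.List.pyRange 0 COLS 1).flatMap (fun col => pvChunk N ldc COLS line col))) := by
  by_cases h : COLS ≤ 0 ∨ LINES ≤ 0
  · show (if COLS ≤ 0 ∨ LINES ≤ 0 then "" else _) = _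
    rw [if_pos h]
    rcases h with h | h
    · simp only [PySem.List.pyRange_one_eq_nil h, List.flatMap_nil, pvFlatMap_nil']
      rfl
    · rw [PySem.List.pyRange_one_eq_nil h]
      rfl
  · push_neg at h
    show (if COLS ≤ 0 ∨ LINES ≤ 0 then "" else _) = _
    rw [if_neg (by omega)]
    apply congrArg String.join
    apply List.flatMap_congr
    intro line _
    rw [PySem.List.pyRange_one_append 0 (COLS - 1) COLS (by omega) (by omega),
        List.flatMap_append, List.map_append, List.map_map]
    have hsing : PySem.List.pyRange (COLS - 1) COLS 1 = [COLS - 1] := by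
      rw [PySem.List.pyRange_one_cons (by omega : COLS - 1 < COLS),
          PySem.List.pyRange_one_eq_nil (by omega : COLS ≤ COLS - 1 + 1)]
    rw [hsing, List.flatMap_cons, List.flatMap_nil, List.append_nil]
    congr 1
    · rw [pvFlatMap_singleton _ (fun col => pvFull ldc (line * COLS + col) (line * ldc + col * 4))]
      · rfl
      · intro col hcol
        have : col < COLS - 1 := (PySem.List.mem_pyRange_one.mp hcol).2
        simp only [pvChunk]
        rw [if_pos (Or.inl (by omega))]
    · simp only [pvChunk]
      by_cases hm : PySem.Int.mod N 4 = 0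
      · rw [if_pos hm, if_pos (Or.inr hm)]
        rfl
      · rw [if_neg hm, if_neg (fun hcon => hcon.elim (fun hne => hne rfl) hm), List.map_map]
        rfl

theorem pvMask_cases (N : Int) :
    PySem.Int.mod N 4 = 0 ∨ PySem.Int.mod N 4 = 1 ∨ PySem.Int.mod N 4 = 2 ∨ PySem.Int.mod N 4 = 3 := by
  rw [PySem.Int.mod_eq_emod_of_pos (by norm_num)]
  omega

theorem pvPointwise (N ldc : Int) (C : Nat) (hC : 0 < C) (line col : Nat) (hcol : col < C) :
    pvGA N ldc (C : Int) (((line * C + col : Nat) : Int))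
      = String.join (pvChunk N ldc (C : Int) (line : Int) (col : Int)) := by
  have hdiv : PySem.Int.floordiv ((line * C + col : Nat) : Int) (C : Int) = (line : Int) := by
    rw [PySem.Int.floordiv_natCast]
    congr 1
    rw [mul_comm, Nat.mul_add_div hC, Nat.div_eq_of_lt hcol]
    omega
  have hmod : PySem.Int.mod ((line * C + col : Nat) : Int) (C : Int) = (col : Int) := by
    rw [PySem.Int.mod_natCast]
    congr 1
    rw [mul_comm, Nat.mul_add_mod, Nat.mod_eq_of_lt hcol]
  have hi : ((line * C + col : Nat) : Int) = (line : Int) * (C : Int) + (col : Int) := by push_cast; ring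
  simp only [pvGA, pvChunk]
  rw [hdiv, hmod, hi]
  by_cases hlast : (col : Int) = (C : Int) - 1
  · rcases pvMask_cases N with hm | hm | hm | hm
    · rw [if_pos hlast, if_pos (Or.inr hm), hm]
      simp [String.join, String.append_empty, String.empty_append]
    · rw [if_pos hlast, hm]
      simp [hlast, PySem.List.pyRange_one, List.range_succ, String.join,
            String.append_assoc, String.append_empty, String.empty_append, add_zero]
    · rw [if_pos hlast, hm]
      simp [hlast, PySem.List.pyRange_one, List.range_succ, String.join,
            String.append_assoc, String.append_empty, String.empty_append, add_zero]
    · rw [if_pos hlast, hm]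
      simp [hlast, PySem.List.pyRange_one, List.range_succ, String.join,
            String.append_assoc, String.append_empty, String.empty_append, add_zero]
  · rw [if_neg hlast, if_pos (Or.inl hlast)]
    simp [String.join, String.append_empty, String.empty_append]

theorem pvMain (N ldc : Int) (C : Nat) (hC : 0 < C) : ∀ (L : Nat),
    String.join ((List.range (L * C)).map (fun k : Nat => pvGA N ldc (C : Int) (k : Int)))
      = String.join ((List.range L).flatMap (fun line : Nat =>
          (List.range C).flatMap (fun col : Nat => pvChunk N ldc (C : Int) (line : Int) (col : Int)))) := by
  intro L
  induction L with
  | zero => simp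
  | succ L ih =>
      have h1 : (L + 1) * C = L * C + C := by ring
      rw [h1, List.range_add, List.map_append, pvJoin_append, ih,
          List.range_succ, List.flatMap_append, pvJoin_append]
      congr 1
      rw [List.flatMap_cons, List.flatMap_nil, List.append_nil, List.map_map, pvJoin_flatMap]
      apply congrArg String.join
      apply List.map_congr_left
      intro col hcol
      have hcol' : col < C := List.mem_range.mp hcol
      have := pvPointwise N ldc C hC L col hcol'
      simpa [Function.comp] using this

theorem pvFull_len (ldc i off : Int) : 0 < (pvFull ldc i off).length := by
  simp only [pvFull, String.length_append]
  have h22 : ("    vst1q_f32(C + m * ").length = 22 := rfl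
  omega

theorem pvLane_len (ldc i off lane : Int) : 0 < (pvLane ldc i off lane).length := by
  simp only [pvLane, String.length_append]
  have h27 : ("    vst1q_lane_f32(C + m * ").length = 27 := rfl
  omega

theorem pvGA_len (N ldc COLS i : Int) : 0 < (pvGA N ldc COLS i).length := by
  have hf := pvFull_len ldc i (PySem.Int.floordiv i COLS * ldc + PySem.Int.mod i COLS * 4)
  have hl := pvLane_len ldc i (PySem.Int.floordiv i COLS * ldc + PySem.Int.mod i COLS * 4) 0
  simp only [pvGA]
  split_ifs <;> (try simp only [String.length_append, String.length_empty]) <;> (try omega)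
  all_goals (rcases pvMask_cases N with h | h | h | h <;> simp_all)

theorem pvJoin_cons_ne (s : String) (l : List String) (hs : 0 < s.length) :
    String.join (s :: l) ≠ "" := by
  intro h
  rw [pvJoin_cons] at h
  have hlen := congrArg String.length h
  rw [String.length_append, String.length_empty] at hlen
  omega

-- ===== VERDICT (by name: the statement is the Claim_ definition above) =====
theorem compile_time_for_store_spec : Claim_unchanged_compile_time_for_store := by
  intro M N K lda ldb ldc COLS LINES _ hD
  rw [pvA_eq, pvB_eq]
  by_cases hC : 0 < COLS
  · by_cases hL : 0 < LINES
    · obtain ⟨c, rfl⟩ : ∃ c : Nat, COLS = (c : Int) := ⟨COLS.toNat, (Int.toNat_of_nonneg hC.le).symm⟩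
      obtain ⟨l, rfl⟩ : ∃ l : Nat, LINES = (l : Int) := ⟨LINES.toNat, (Int.toNat_of_nonneg hL.le).symm⟩
      have hlc : (l : Int) * (c : Int) = ((l * c : Nat) : Int) := by push_cast; ring
      rw [hlc, PySem.List.pyRange_zero_nat, PySem.List.pyRange_zero_nat, PySem.List.pyRange_zero_nat,
          List.map_map, List.flatMap_map]
      have := pvMain N ldc c (by exact_mod_cast hC) l
      simpa [Function.comp, List.flatMap_map] using this
    · have h1 : LINES * COLS ≤ 0 := mul_nonpos_of_nonpos_of_nonneg (by omega) hC.le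
      rw [PySem.List.pyRange_one_eq_nil h1, PySem.List.pyRange_one_eq_nil (by omega : LINES ≤ (0:Int))]
      simp
  · have h1 : LINES * COLS ≤ 0 := by
      rcases lt_or_eq_of_le (by omega : COLS ≤ 0) with h | h
      · have hL0 : 0 ≤ LINES := by
          by_contra hneg
          exact hD ⟨h, by omega⟩
        exact mul_nonpos_of_nonneg_of_nonpos hL0 h.le
      · simp [h]
    rw [PySem.List.pyRange_one_eq_nil h1, PySem.List.pyRange_one_eq_nil (by omega : COLS ≤ (0:Int))]
    simp [pvFlatMap_nil']

theorem compile_time_for_store_changed : Claim_changed_compile_time_for_store := by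
  unfold Claim_changed_compile_time_for_store; decide

theorem compile_time_for_store_tight : Claim_exact_compile_time_for_store := by
  intro M N K lda ldb ldc COLS LINES _ hD
  obtain ⟨hC, hL⟩ := hD
  rw [pvA_eq, pvB_eq, PySem.List.pyRange_one_eq_nil (by omega : LINES ≤ (0:Int))]
  simp only [List.flatMap_nil]
  have hpos : 0 < LINES * COLS := mul_pos_of_neg_of_neg hL hC
  rw [PySem.List.pyRange_one_cons (by omega : (0:Int) < LINES * COLS), List.map_cons]
  exact pvJoin_cons_ne _ _ (pvGA_len N ldc COLS 0)
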